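-- pv_equiv track=rewrite | github.com/tech9md/vibelympics | round_2/backend/app/analyzers/typosquatting.py | _check_prefix_suffix_attacks
-- ===== SOURCE A (Python) =====
-- from typing import Dict, Any, List, Optional, Tuple
--
-- def _check_prefix_suffix_attacks(
--     name: str, packages: List[str]
-- ) -> List[Tuple[str, str]]:
--     """Check for common prefix/suffix attack patterns."""
--     results = []
--
--     # Common malicious prefixes/suffixes
--     prefixes = ["python-", "py-", "python3-", "py3-", "lib", "core-"]
--     suffixes = ["-python", "-py", "-lib", "-core", "-dev", "-utils", "2", "3"]
--
--     for pkg in packages[:100]:  # Check top 100 only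
--         pkg_normalized = pkg.lower().replace("-", "").replace("_", "")
--
--         # Check if name is package with added prefix
--         for prefix in prefixes:
--             if name == prefix.replace("-", "") + pkg_normalized:
--                 results.append((pkg, f"added prefix '{prefix}'"))
--
--         # Check if name is package with added suffix
--         for suffix in suffixes:
--             if name == pkg_normalized + suffix.replace("-", ""):
--                 results.append((pkg, f"added suffix '{suffix}'"))
--
--         # Check if name is package with removed prefix
--         for prefix in prefixes:
--             if pkg_normalized.startswith(prefix.replace("-", "")):
--                 if name == pkg_normalized[len(prefix.replace("-", "")):]:
--                     results.append((pkg, f"removed prefix '{prefix}'"))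
--
--     return results
-- ===== SOURCE B (Python) =====
-- from typing import List, Tuple
--
--
-- def _check_prefix_suffix_attacks(
--     name: str, packages: List[str]
-- ) -> List[Tuple[str, str]]:
--     """Check for common prefix/suffix attack patterns (table-lookup version)."""
--     prefixes = ["python-", "py-", "python3-", "py3-", "lib", "core-"]
--     suffixes = ["-python", "-py", "-lib", "-core", "-dev", "-utils", "2", "3"]
--
--     # Build lookup tables from `name` once, instead of rescanning the affix
--     # lists for every package.
--     added = {}      # pkg_normalized -> prefix, when name == stripped_prefix + pkg_normalized
--     for prefix in prefixes:
--         sp = prefix.replace("-", "")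
--         if name.startswith(sp):
--             added[name[len(sp):]] = prefix
--
--     suffixed = {}   # pkg_normalized -> suffix, when name == pkg_normalized + stripped_suffix
--     for suffix in suffixes:
--         ss = suffix.replace("-", "")
--         if name.endswith(ss):
--             suffixed[name[:-len(ss)]] = suffix
--
--     removed = {}    # pkg_normalized -> prefix, when pkg_normalized == stripped_prefix + name
--     for prefix in prefixes:
--         removed[prefix.replace("-", "") + name] = prefix
--
--     results = []
--     for pkg in packages[:100]:
--         pkg_normalized = pkg.lower().replace("-", "").replace("_", "")
--         if pkg_normalized in added:
--             results.append((pkg, f"added prefix '{added[pkg_normalized]}'"))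
--         if pkg_normalized in suffixed:
--             results.append((pkg, f"added suffix '{suffixed[pkg_normalized]}'"))
--         if pkg_normalized in removed:
--             results.append((pkg, f"removed prefix '{removed[pkg_normalized]}'"))
--     return results
-- ===== Notes on version B (the rewrite author's own statement) =====
-- stated objective: alternative
-- what changed: Instead of rescanning the three fixed prefix/suffix lists for every package, B precomputes three dictionaries from `name` (normalized-package-form -> matching affix) once and then makes a single lookup pass over packages[:100]; at most one affix per category can match a given package, so the per-package lookup reproduces A's per-package append order exactly.
import Mathlib
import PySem

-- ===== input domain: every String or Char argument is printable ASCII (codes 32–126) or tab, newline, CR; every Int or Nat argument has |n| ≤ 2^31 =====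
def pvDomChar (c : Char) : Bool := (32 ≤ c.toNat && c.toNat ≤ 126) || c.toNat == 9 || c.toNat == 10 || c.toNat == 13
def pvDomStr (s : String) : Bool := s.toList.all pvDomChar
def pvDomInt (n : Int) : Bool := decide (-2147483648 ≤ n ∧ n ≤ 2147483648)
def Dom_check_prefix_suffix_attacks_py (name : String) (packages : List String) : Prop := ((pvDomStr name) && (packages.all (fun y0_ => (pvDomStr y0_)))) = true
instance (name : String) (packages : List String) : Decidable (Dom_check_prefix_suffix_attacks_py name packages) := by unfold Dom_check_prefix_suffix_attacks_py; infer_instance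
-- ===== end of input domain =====

-- B replaces A's per-package rescans of the fixed prefix/suffix lists by three
-- lookup tables precomputed from `name` and a single lookup pass over packages[:100]
-- (objective: alternative; same return value).

-- ===== PORT A =====
def check_prefix_suffix_attacks_py (name : String) (packages : List String) : List (String × String) :=
  let prefixes : List String := ["python-", "py-", "python3-", "py3-", "lib", "core-"]
  let suffixes : List String := ["-python", "-py", "-lib", "-core", "-dev", "-utils", "2", "3"]
  (PySem.List.slice packages none (some 100)).foldl (fun results pkg =>
    let pkgNormalized := PySem.Str.replace (PySem.Str.replace (PySem.Str.lower pkg) "-" "") "_" ""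
    let r1 := prefixes.foldl (fun res pfx =>
      if name == PySem.Str.replace pfx "-" "" ++ pkgNormalized then
        res ++ [(pkg, "added prefix '" ++ pfx ++ "'")] else res) results
    let r2 := suffixes.foldl (fun res sfx =>
      if name == pkgNormalized ++ PySem.Str.replace sfx "-" "" then
        res ++ [(pkg, "added suffix '" ++ sfx ++ "'")] else res) r1
    prefixes.foldl (fun res pfx =>
      if PySem.Str.startswith pkgNormalized (PySem.Str.replace pfx "-" "") then
        if name == PySem.Str.slice pkgNormalized (some (PySem.Str.len (PySem.Str.replace pfx "-" ""))) none then
          res ++ [(pkg, "removed prefix '" ++ pfx ++ "'")] else res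
      else res) r2) []

-- ===== PORT B =====
def check_prefix_suffix_attacks_py_alt (name : String) (packages : List String) : List (String × String) :=
  let prefixes : List String := ["python-", "py-", "python3-", "py3-", "lib", "core-"]
  let suffixes : List String := ["-python", "-py", "-lib", "-core", "-dev", "-utils", "2", "3"]
  let added : PySem.Dict String String := prefixes.foldl (fun d pfx =>
    if PySem.Str.startswith name (PySem.Str.replace pfx "-" "") then
      d.insert (PySem.Str.slice name (some (PySem.Str.len (PySem.Str.replace pfx "-" ""))) none) pfx
    else d) PySem.Dict.empty
  let suffixed : PySem.Dict String String := suffixes.foldl (fun d sfx =>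
    if PySem.Str.endswith name (PySem.Str.replace sfx "-" "") then
      d.insert (PySem.Str.slice name none (some (-(PySem.Str.len (PySem.Str.replace sfx "-" ""))))) sfx
    else d) PySem.Dict.empty
  let removed : PySem.Dict String String := prefixes.foldl (fun d pfx =>
    d.insert (PySem.Str.replace pfx "-" "" ++ name) pfx) PySem.Dict.empty
  (PySem.List.slice packages none (some 100)).foldl (fun results pkg =>
    let pkgNormalized := PySem.Str.replace (PySem.Str.replace (PySem.Str.lower pkg) "-" "") "_" ""
    let r1 := match added.get? pkgNormalized with
      | some pfx => results ++ [(pkg, "added prefix '" ++ pfx ++ "'")]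
      | none => results
    let r2 := match suffixed.get? pkgNormalized with
      | some sfx => r1 ++ [(pkg, "added suffix '" ++ sfx ++ "'")]
      | none => r1
    match removed.get? pkgNormalized with
      | some pfx => r2 ++ [(pkg, "removed prefix '" ++ pfx ++ "'")]
      | none => r2) []

-- ===== PRECONDITION & SPEC =====
def Spec_check_prefix_suffix_attacks_py (name : String) (packages : List String) (out : List (String × String)) : Prop := out = check_prefix_suffix_attacks_py_alt name packages
instance (name : String) (packages : List String) (out : List (String × String)) : Decidable (Spec_check_prefix_suffix_attacks_py name packages out) := by unfold Spec_check_prefix_suffix_attacks_py; infer_instance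

-- ===== CLAIM (what is proved, stated in full; the proofs are below) =====
def Claim_equal_check_prefix_suffix_attacks_py : Prop := ∀ (name : String) (packages : List String), Dom_check_prefix_suffix_attacks_py name packages → Spec_check_prefix_suffix_attacks_py name packages (check_prefix_suffix_attacks_py name packages)

-- ===== LEMMAS AND PROOFS =====

-- String append cancellation, via toList.
theorem pv_cancel_r (a b n : String) (h : a ++ n = b ++ n) : a = b := by
  apply String.toList_inj.mp
  have h' : a.toList ++ n.toList = b.toList ++ n.toList := by
    simpa using congrArg String.toList h
  exact List.append_cancel_right h'

theorem pv_cancel_l (a b n : String) (h : n ++ a = n ++ b) : a = b := by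
  apply String.toList_inj.mp
  have h' : n.toList ++ a.toList = n.toList ++ b.toList := by
    simpa using congrArg String.toList h
  exact List.append_cancel_left h'

-- `name == sp + n` is exactly `name.startswith(sp) and name[len(sp):] == n`.
theorem pv_start_iff (name sp n : String) :
    name = sp ++ n ↔
      (PySem.Str.startswith name sp = true ∧
        PySem.Str.slice name (some (PySem.Str.len sp)) none = n) := by
  have h1 : name = sp ++ n ↔ name.toList = sp.toList ++ n.toList := by
    constructor
    · intro h; simp [h]
    · intro h; apply String.toList_inj.mp; simpa using h
  have h2 : PySem.Str.startswith name sp = true ↔ sp.toList <+: name.toList := by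
    simp [PySem.Chars.startswith_iff]
  have h3 : PySem.Str.slice name (some (PySem.Str.len sp)) none = n ↔
      name.toList.drop sp.toList.length = n.toList := by
    rw [← String.toList_inj, PySem.Str.toList_slice, PySem.Chars.slice_eq_listSlice,
      PySem.Str.len_eq, PySem.List.slice_from_natCast]
  rw [h1, h2, h3]
  constructor
  · intro h
    refine ⟨⟨n.toList, h.symm⟩, by rw [h]; simp⟩
  · rintro ⟨⟨t, ht⟩, h⟩
    rw [← ht] at h ⊢
    simp at h
    rw [h]

-- `name == n + ss` is exactly `name.endswith(ss) and name[:-len(ss)] == n` (ss nonempty).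
theorem pv_end_iff (name ss n : String) (hss : ss.toList ≠ []) :
    name = n ++ ss ↔
      (PySem.Str.endswith name ss = true ∧
        PySem.Str.slice name none (some (-(PySem.Str.len ss))) = n) := by
  have h1 : name = n ++ ss ↔ name.toList = n.toList ++ ss.toList := by
    constructor
    · intro h; simp [h]
    · intro h; apply String.toList_inj.mp; simpa using h
  have h2 : PySem.Str.endswith name ss = true ↔ ss.toList <:+ name.toList := by
    simp [PySem.Chars.endswith_iff]
  have h3 : PySem.Str.slice name none (some (-(PySem.Str.len ss))) = n ↔
      name.toList.take (name.toList.length - ss.toList.length) = n.toList := by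
    have hk : 0 < ss.toList.length := List.length_pos_iff.mpr hss
    rw [← String.toList_inj, PySem.Str.toList_slice, PySem.Chars.slice_eq_listSlice,
      PySem.Str.len_eq, PySem.List.slice_to_neg_natCast name.toList ss.toList.length hk]
  rw [h1, h2, h3]
  constructor
  · intro h
    refine ⟨⟨n.toList, h.symm⟩, by rw [h]; simp⟩
  · rintro ⟨⟨t, ht⟩, h⟩
    rw [← ht] at h ⊢
    simp at h
    rw [h]

-- injectivity on a list whose image is Nodup
theorem pv_injOnNodupMap (l : List String) (f : String → String) (h : (l.map f).Nodup)
    (x y : String) (hx : x ∈ l) (hy : y ∈ l) (hf : f x = f y) : x = y := by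
  induction l with
  | nil => cases hx
  | cons a t ih =>
    simp only [List.map_cons, List.nodup_cons] at h
    rcases List.mem_cons.mp hx with rfl | hx' <;> rcases List.mem_cons.mp hy with rfl | hy'
    · rfl
    · exact absurd (hf ▸ List.mem_map_of_mem (f := f) hy') h.1
    · exact absurd (hf ▸ List.mem_map_of_mem (f := f) hx') h.1
    · exact ih h.2 hx' hy'

-- a dict-building fold seen through one lookup: each step either writes the key or not
theorem pv_dictfold_get (l : List String) (F : PySem.Dict String String → String → PySem.Dict String String)
    (c : String → Bool) (q : String)
    (hstep : ∀ d p, p ∈ l → (F d p).get? q = if c p then some p else d.get? q) :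
    ∀ d : PySem.Dict String String,
      (l.foldl F d).get? q = l.foldl (fun o p => if c p then some p else o) (d.get? q) := by
  induction l with
  | nil => intro d; rfl
  | cons a t ih =>
    intro d
    simp only [List.foldl_cons]
    rw [ih (fun d p hp => hstep d p (List.mem_cons_of_mem a hp)) (F d a),
      hstep d a List.mem_cons_self]

-- last write wins = last match of the filter
theorem pv_optfold_getLast (l : List String) (c : String → Bool) :
    ∀ o₀ : Option String,
      l.foldl (fun o p => if c p then some p else o) o₀ = ((l.filter c).getLast?).or o₀ := by
  induction l with
  | nil => intro o₀; simp
  | cons a t ih =>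
    intro o₀
    simp only [List.foldl_cons, List.filter_cons]
    by_cases hc : c a = true
    · rw [if_pos hc, if_pos hc, ih]
      have hcons : ∀ (xs : List String), (a :: xs).getLast? = xs.getLast?.or (some a) := by
        intro xs; cases h : xs.getLast? <;> simp_all [List.getLast?_cons, Option.or]
      rw [hcons, Option.or_assoc]
      simp
    · rw [if_neg hc, if_neg hc, ih]

-- when at most one element can match, appending all matches = appending the last one
theorem pv_filter_single {γ : Type} (l : List String) (c : String → Bool) (g : String → String)
    (hnd : (l.map g).Nodup) (hexc : ∀ a b, c a = true → c b = true → g a = g b)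
    (f : String → γ) (acc : List γ) :
    acc ++ (l.filter c).map f =
      (match (l.filter c).getLast? with
        | some p => acc ++ [f p]
        | none => acc) := by
  cases h : l.filter c with
  | nil => simp
  | cons a t =>
    cases t with
    | nil => simp
    | cons b t2 =>
      exfalso
      have ha : a ∈ l.filter c := by rw [h]; exact List.mem_cons_self
      have hb : b ∈ l.filter c := by rw [h]; exact List.mem_cons_of_mem a List.mem_cons_self
      have hca := (List.mem_filter.mp ha).2
      have hcb := (List.mem_filter.mp hb).2
      have hab : a = b :=
        pv_injOnNodupMap l g hnd a b (List.mem_filter.mp ha).1 (List.mem_filter.mp hb).1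
          (hexc a b hca hcb)
      have : (l.filter c).Nodup := (List.Nodup.of_map g hnd).filter c
      rw [h] at this
      exact (List.nodup_cons.mp this).1 (hab ▸ List.mem_cons_self)

-- ---- stage 1: added prefix ----
theorem pv_stage_added (name pkg n : String) (l : List String)
    (hnd : (l.map (fun p => PySem.Str.replace p "-" "")).Nodup) (acc : List (String × String)) :
    l.foldl (fun res pfx =>
        if name == PySem.Str.replace pfx "-" "" ++ n then
          res ++ [(pkg, "added prefix '" ++ pfx ++ "'")] else res) acc =
      (match (l.foldl (fun d pfx =>
          if PySem.Str.startswith name (PySem.Str.replace pfx "-" "") then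
            d.insert (PySem.Str.slice name (some (PySem.Str.len (PySem.Str.replace pfx "-" ""))) none) pfx
          else d) PySem.Dict.empty).get? n with
        | some pfx => acc ++ [(pkg, "added prefix '" ++ pfx ++ "'")]
        | none => acc) := by
  rw [PySem.List.foldl_append_if (fun pfx => name == PySem.Str.replace pfx "-" "" ++ n)
    (fun pfx => (pkg, "added prefix '" ++ pfx ++ "'"))]
  rw [pv_dictfold_get l _ (fun pfx => name == PySem.Str.replace pfx "-" "" ++ n) n ?hstep]
  · rw [PySem.Dict.get?_empty, pv_optfold_getLast, Option.or_none]
    exact pv_filter_single l _ (fun p => PySem.Str.replace p "-" "") hnd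
      (fun a b hca hcb => pv_cancel_r _ _ n
        ((eq_of_beq hca).symm.trans (eq_of_beq hcb))) _ acc
  case hstep =>
    intro d p _
    by_cases hc : name = PySem.Str.replace p "-" "" ++ n
    · obtain ⟨hs, hk⟩ := (pv_start_iff name _ n).mp hc
      rw [if_pos hs, PySem.Dict.get?_insert, if_pos hk.symm, if_pos (beq_iff_eq.mpr hc)]
    · rw [if_neg (fun h => hc (eq_of_beq h))]
      by_cases hs : PySem.Str.startswith name (PySem.Str.replace p "-" "") = true
      · rw [if_pos hs, PySem.Dict.get?_insert,
          if_neg (fun h => hc ((pv_start_iff name _ n).mpr ⟨hs, h.symm⟩))]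
      · rw [if_neg hs]

-- ---- stage 2: added suffix ----
theorem pv_stage_suffix (name pkg n : String) (l : List String)
    (hnd : (l.map (fun s => PySem.Str.replace s "-" "")).Nodup)
    (hne : ∀ s ∈ l, (PySem.Str.replace s "-" "").toList ≠ []) (acc : List (String × String)) :
    l.foldl (fun res sfx =>
        if name == n ++ PySem.Str.replace sfx "-" "" then
          res ++ [(pkg, "added suffix '" ++ sfx ++ "'")] else res) acc =
      (match (l.foldl (fun d sfx =>
          if PySem.Str.endswith name (PySem.Str.replace sfx "-" "") then
            d.insert (PySem.Str.slice name none (some (-(PySem.Str.len (PySem.Str.replace sfx "-" ""))))) sfx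
          else d) PySem.Dict.empty).get? n with
        | some sfx => acc ++ [(pkg, "added suffix '" ++ sfx ++ "'")]
        | none => acc) := by
  rw [PySem.List.foldl_append_if (fun sfx => name == n ++ PySem.Str.replace sfx "-" "")
    (fun sfx => (pkg, "added suffix '" ++ sfx ++ "'"))]
  rw [pv_dictfold_get l _ (fun sfx => name == n ++ PySem.Str.replace sfx "-" "") n ?hstep]
  · rw [PySem.Dict.get?_empty, pv_optfold_getLast, Option.or_none]
    exact pv_filter_single l _ (fun s => PySem.Str.replace s "-" "") hnd
      (fun a b hca hcb => pv_cancel_l _ _ n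
        ((eq_of_beq hca).symm.trans (eq_of_beq hcb))) _ acc
  case hstep =>
    intro d s hs
    by_cases hc : name = n ++ PySem.Str.replace s "-" ""
    · obtain ⟨he, hk⟩ := (pv_end_iff name _ n (hne s hs)).mp hc
      rw [if_pos he, PySem.Dict.get?_insert, if_pos hk.symm, if_pos (beq_iff_eq.mpr hc)]
    · rw [if_neg (fun h => hc (eq_of_beq h))]
      by_cases he : PySem.Str.endswith name (PySem.Str.replace s "-" "") = true
      · rw [if_pos he, PySem.Dict.get?_insert,
          if_neg (fun h => hc ((pv_end_iff name _ n (hne s hs)).mpr ⟨he, h.symm⟩))]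
      · rw [if_neg he]

-- ---- stage 3: removed prefix ----
theorem pv_stage_removed (name pkg n : String) (l : List String)
    (hnd : (l.map (fun p => PySem.Str.replace p "-" "")).Nodup) (acc : List (String × String)) :
    l.foldl (fun res pfx =>
        if PySem.Str.startswith n (PySem.Str.replace pfx "-" "") then
          if name == PySem.Str.slice n (some (PySem.Str.len (PySem.Str.replace pfx "-" ""))) none then
            res ++ [(pkg, "removed prefix '" ++ pfx ++ "'")] else res
        else res) acc =
      (match (l.foldl (fun d pfx =>
          d.insert (PySem.Str.replace pfx "-" "" ++ name) pfx) PySem.Dict.empty).get? n with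
        | some pfx => acc ++ [(pkg, "removed prefix '" ++ pfx ++ "'")]
        | none => acc) := by
  rw [PySem.List.foldl_congr_mem l _
    (fun res pfx => if n == PySem.Str.replace pfx "-" "" ++ name then
      res ++ [(pkg, "removed prefix '" ++ pfx ++ "'")] else res) acc ?hbody]
  · rw [PySem.List.foldl_append_if (fun pfx => n == PySem.Str.replace pfx "-" "" ++ name)
      (fun pfx => (pkg, "removed prefix '" ++ pfx ++ "'"))]
    rw [pv_dictfold_get l _ (fun pfx => n == PySem.Str.replace pfx "-" "" ++ name) n ?hstep]
    · rw [PySem.Dict.get?_empty, pv_optfold_getLast, Option.or_none]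
      exact pv_filter_single l _ (fun p => PySem.Str.replace p "-" "") hnd
        (fun a b hca hcb => pv_cancel_r _ _ name
          ((eq_of_beq hca).symm.trans (eq_of_beq hcb))) _ acc
    case hstep =>
      intro d p _
      rw [PySem.Dict.get?_insert]
      by_cases hc : n = PySem.Str.replace p "-" "" ++ name
      · rw [if_pos hc, if_pos (beq_iff_eq.mpr hc)]
      · rw [if_neg hc, if_neg (fun h => hc (eq_of_beq h))]
  case hbody =>
    intro res p _
    dsimp only
    by_cases hc : n = PySem.Str.replace p "-" "" ++ name
    · obtain ⟨hs, hk⟩ := (pv_start_iff n _ name).mp hc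
      rw [if_pos hs, if_pos (beq_iff_eq.mpr hk.symm), if_pos (beq_iff_eq.mpr hc)]
    · rw [if_neg (fun h => hc (eq_of_beq h))]
      by_cases hs : PySem.Str.startswith n (PySem.Str.replace p "-" "") = true
      · rw [if_pos hs,
          if_neg (fun h => hc ((pv_start_iff n _ name).mpr ⟨hs, (eq_of_beq h).symm⟩))]
      · rw [if_neg hs]

-- ===== VERDICT (by name: the statement is the Claim_ definition above) =====
theorem check_prefix_suffix_attacks_py_spec : Claim_equal_check_prefix_suffix_attacks_py := by
  intro name packages _
  unfold Spec_check_prefix_suffix_attacks_py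
  unfold check_prefix_suffix_attacks_py check_prefix_suffix_attacks_py_alt
  dsimp only
  apply PySem.List.foldl_congr_mem
  intro acc pkg _
  dsimp only
  rw [pv_stage_added name pkg _ _ (by decide) acc,
    pv_stage_suffix name pkg _ _ (by decide) (by decide) _,
    pv_stage_removed name pkg _ _ (by decide) _]
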